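-- pv_equiv track=rewrite | github.com/karlosA99/codeforces_problem_1485C | Floor_and_Mod.py | CountSpecialsPairs_BF
-- ===== SOURCE A (Python) =====
-- def CountSpecialsPairs_BF(x, y):
--     count = 0  #inicializamos la cantidad de pares especiales en 0
--
--     for i in range(1, x + 1):         #con estos dos ciclos for creamos todos los posibles pares (a,b)
--         for j in range(1, y + 1):
--             div = i // j
--             mod = i % j
--             if (div == mod):    #comprobamos si cumplen la propiedad de formar un par especial
--                 count += 1    #en caso positivo aumentamos count en 1
--     return count
-- ===== SOURCE B (Python) =====
-- def CountSpecialsPairs_BF(x, y):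
--     # a//b == a%b == k  <=>  a == k*(b+1) with 1 <= k <= b-1; for each b,
--     # the number of valid a in [1, x] is max(0, min(b-1, x // (b+1))),
--     # which is 0 unless b+1 <= x, so b only runs up to min(y, x-1).
--     count = 0
--     for j in range(2, min(y, x - 1) + 1):
--         t = min(j - 1, x // (j + 1))
--         if t > 0:
--             count += t
--     return count
-- ===== Notes on version B (the rewrite author's own statement) =====
-- stated objective: faster
-- what changed: Replaced the O(x*y) double loop testing every pair by a single loop over b that counts the valid a-values arithmetically: a//b == a%b == k iff a = k*(b+1) with 1 <= k <= b-1, so each b in [2, min(y, x-1)] contributes max(0, min(b-1, x//(b+1))).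
import Mathlib
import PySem

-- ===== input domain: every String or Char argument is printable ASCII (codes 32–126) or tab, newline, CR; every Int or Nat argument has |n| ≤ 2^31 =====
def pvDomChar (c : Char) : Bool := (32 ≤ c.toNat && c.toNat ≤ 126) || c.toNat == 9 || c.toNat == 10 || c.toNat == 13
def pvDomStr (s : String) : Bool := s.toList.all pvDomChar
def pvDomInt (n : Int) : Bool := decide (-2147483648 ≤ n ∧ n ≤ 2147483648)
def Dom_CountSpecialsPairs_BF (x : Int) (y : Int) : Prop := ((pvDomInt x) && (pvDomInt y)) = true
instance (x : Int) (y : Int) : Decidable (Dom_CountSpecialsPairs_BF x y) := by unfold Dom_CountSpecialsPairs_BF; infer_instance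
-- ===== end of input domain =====

-- B replaces A's O(x*y) pair-testing double loop by one loop over b using the
-- characterisation a//b == a%b == k  ↔  a = k*(b+1), 1 ≤ k ≤ b-1  (objective: faster).


-- ===== PORT A =====
def CountSpecialsPairs_BF (x : Int) (y : Int) : Int :=
  (PySem.List.pyRange 1 (x + 1) 1).foldl (fun count i =>
    (PySem.List.pyRange 1 (y + 1) 1).foldl (fun count j =>
      let div := PySem.Int.floordiv i j
      let mod := PySem.Int.mod i j
      if div == mod then count + 1 else count) count) 0

-- ===== PORT B =====
def CountSpecialsPairs_BF_alt (x : Int) (y : Int) : Int :=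
  (PySem.List.pyRange 2 (min y (x - 1) + 1) 1).foldl (fun count j =>
    let t := min (j - 1) (PySem.Int.floordiv x (j + 1))
    if t > 0 then count + t else count) 0

-- ===== PRECONDITION & SPEC =====
def Spec_CountSpecialsPairs_BF (x : Int) (y : Int) (out : Int) : Prop := out = CountSpecialsPairs_BF_alt x y
instance (x : Int) (y : Int) (out : Int) : Decidable (Spec_CountSpecialsPairs_BF x y out) := by unfold Spec_CountSpecialsPairs_BF; infer_instance

-- ===== CLAIM (what is proved, stated in full; the proofs are below) =====
def Claim_equal_CountSpecialsPairs_BF : Prop := ∀ (x : Int) (y : Int), Dom_CountSpecialsPairs_BF x y → Spec_CountSpecialsPairs_BF x y (CountSpecialsPairs_BF x y)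

-- ===== LEMMAS AND PROOFS =====

-- a pyRange-mapped list sum is a Finset.Ico sum
theorem pvSum_pyRange_map (a b : Int) (f : Int → Int) :
    ((PySem.List.pyRange a b 1).map f).sum = ∑ i ∈ Finset.Ico a b, f i := by
  rw [← List.sum_toFinset f (PySem.List.nodup_pyRange_one a b)]
  congr 1
  ext i
  simp [PySem.List.mem_pyRange_one, Finset.mem_Ico]

theorem pvCountP_as_sum (l : List Int) (p : Int → Bool) :
    (l.countP p : Int) = (l.map (fun j => if p j then (1 : Int) else 0)).sum := by
  induction l with
  | nil => simp
  | cons h t ih =>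
    by_cases hp : p h <;> simp [hp, ih] <;> ring

-- the nested loop of A as a sum of per-i counts
theorem pvOuter (L1 L2 : List Int) (p : Int → Int → Bool) (a : Int) :
    L1.foldl (fun c i => L2.foldl (fun c j => if p i j then c + 1 else c) c) a
      = a + (L1.map (fun i => (L2.countP (p i) : Int))).sum := by
  have h1 : (fun (c i : Int) => L2.foldl (fun c j => if p i j then c + 1 else c) c)
      = fun c i => c + (L2.countP (p i) : Int) := by
    funext c i
    rw [PySem.List.foldl_if_add_one]
  rw [h1, PySem.List.foldl_add]

-- core counting identity: for 0 < j, the number of i in [1,x] with i//j == i%j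
theorem pvCore (x j : Int) (hj : 0 < j) :
    (∑ i ∈ Finset.Ico 1 (x + 1),
        if (PySem.Int.floordiv i j == PySem.Int.mod i j) then (1 : Int) else 0)
      = (if 0 < min (j - 1) (PySem.Int.floordiv x (j + 1)) then
          min (j - 1) (PySem.Int.floordiv x (j + 1)) else 0) := by
  have hj1 : (0 : Int) < j + 1 := by omega
  have hx : PySem.Int.floordiv x (j + 1) = x / (j + 1) :=
    PySem.Int.floordiv_eq_ediv_of_pos hj1
  have hstep : ∀ i : Int,
      ((PySem.Int.floordiv i j == PySem.Int.mod i j) = true) ↔ i / j = i % j := by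
    intro i
    rw [PySem.Int.floordiv_eq_ediv_of_pos hj, PySem.Int.mod_eq_emod_of_pos hj]
    exact beq_iff_eq
  set m : Int := min (j - 1) (x / (j + 1)) with hm
  have hfilter : (Finset.Ico (1 : Int) (x + 1)).filter (fun i => i / j = i % j)
      = (Finset.Icc (1 : Int) m).image (fun k => k * (j + 1)) := by
    ext i
    simp only [Finset.mem_filter, Finset.mem_Ico, Finset.mem_image, Finset.mem_Icc]
    constructor
    · rintro ⟨⟨h1, h2⟩, hd⟩
      have h0 : 0 ≤ i % j := Int.emod_nonneg i (by omega)
      have hlt : i % j < j := Int.emod_lt_of_pos i hj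
      have key : j * (i % j) + i % j = i := by
        have h := Int.mul_ediv_add_emod i j
        rw [hd] at h
        exact h
      have hieq : i % j * (j + 1) = i := by linear_combination key
      have hk1 : 1 ≤ i % j := by
        by_cases hz : i % j = 0
        · rw [hz] at key; omega
        · omega
      have hle : i % j * (j + 1) ≤ x := by rw [hieq]; omega
      have h2' : i % j ≤ x / (j + 1) := (Int.le_ediv_iff_mul_le hj1).mpr hle
      exact ⟨i % j, ⟨hk1, le_min (by omega) h2'⟩, hieq⟩
    · rintro ⟨k, ⟨hk1, hk2⟩, rfl⟩
      have hkj : k ≤ j - 1 := le_trans hk2 (min_le_left _ _)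
      have hkx : k ≤ x / (j + 1) := le_trans hk2 (min_le_right _ _)
      have hix : k * (j + 1) ≤ x := (Int.le_ediv_iff_mul_le hj1).mp hkx
      have h1 : 1 ≤ k * (j + 1) := by nlinarith
      refine ⟨⟨h1, by omega⟩, ?_⟩
      have hke : k * (j + 1) = k + j * k := by ring
      rw [hke]
      rw [Int.add_mul_ediv_left k k (by omega : j ≠ 0),
          Int.add_mul_emod_self_left]
      rw [Int.ediv_eq_zero_of_lt (by omega) (by omega),
          Int.emod_eq_of_lt (by omega) (by omega)]
      omega
  have hinj : Set.InjOn (fun k : Int => k * (j + 1)) (Finset.Icc (1 : Int) m) := by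
    intro a _ b _ h
    simpa using mul_right_cancel₀ (by omega : (j + 1 : Int) ≠ 0) h
  calc (∑ i ∈ Finset.Ico 1 (x + 1),
          if (PySem.Int.floordiv i j == PySem.Int.mod i j) then (1 : Int) else 0)
      = ∑ i ∈ Finset.Ico 1 (x + 1), if i / j = i % j then (1 : Int) else 0 := by
        refine Finset.sum_congr rfl fun i _ => ?_
        by_cases h : i / j = i % j
        · rw [if_pos ((hstep i).mpr h), if_pos h]
        · rw [if_neg (fun hc => h ((hstep i).mp hc)), if_neg h]
    _ = (((Finset.Ico (1 : Int) (x + 1)).filter (fun i => i / j = i % j)).card : Int) := by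
        rw [Finset.sum_boole]
    _ = (((Finset.Icc (1 : Int) m).image (fun k => k * (j + 1))).card : Int) := by
        rw [hfilter]
    _ = ((Finset.Icc (1 : Int) m).card : Int) := by
        rw [Finset.card_image_of_injOn hinj]
    _ = ((m + 1 - 1).toNat : Int) := by rw [Int.card_Icc]
    _ = (if 0 < min (j - 1) (PySem.Int.floordiv x (j + 1)) then
          min (j - 1) (PySem.Int.floordiv x (j + 1)) else 0) := by
        rw [hx, ← hm]
        omega

-- B's loop as a Finset sum
theorem pvAltSum (x y : Int) :
    CountSpecialsPairs_BF_alt x y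
      = ∑ j ∈ Finset.Ico 2 (min y (x - 1) + 1),
          (if 0 < min (j - 1) (PySem.Int.floordiv x (j + 1)) then
            min (j - 1) (PySem.Int.floordiv x (j + 1)) else 0) := by
  unfold CountSpecialsPairs_BF_alt
  have : (fun (count j : Int) =>
      let t := min (j - 1) (PySem.Int.floordiv x (j + 1))
      if t > 0 then count + t else count)
    = fun count j => count +
        (if 0 < min (j - 1) (PySem.Int.floordiv x (j + 1)) then
          min (j - 1) (PySem.Int.floordiv x (j + 1)) else 0) := by
    funext c j
    simp only []
    split_ifs with h
    · rfl
    · omega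
  rw [this, PySem.List.foldl_add, pvSum_pyRange_map, zero_add]

-- A's loops as the same Finset sum
theorem pvASum (x y : Int) :
    CountSpecialsPairs_BF x y
      = ∑ j ∈ Finset.Ico 1 (y + 1), ∑ i ∈ Finset.Ico 1 (x + 1),
          (if (PySem.Int.floordiv i j == PySem.Int.mod i j) then (1 : Int) else 0) := by
  unfold CountSpecialsPairs_BF
  rw [pvOuter, zero_add, pvSum_pyRange_map]
  rw [← Finset.sum_comm]
  refine Finset.sum_congr rfl fun i _ => ?_
  rw [pvCountP_as_sum, pvSum_pyRange_map]

-- terms with j > min(y, x-1) vanish, so B's shorter range sums to the same value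
theorem pvExtend (x y : Int) :
    (∑ j ∈ Finset.Ico 2 (min y (x - 1) + 1),
        (if 0 < min (j - 1) (PySem.Int.floordiv x (j + 1)) then
          min (j - 1) (PySem.Int.floordiv x (j + 1)) else 0))
      = ∑ j ∈ Finset.Ico 2 (y + 1),
          (if 0 < min (j - 1) (PySem.Int.floordiv x (j + 1)) then
            min (j - 1) (PySem.Int.floordiv x (j + 1)) else 0) := by
  refine Finset.sum_subset ?_ ?_
  · intro a ha
    have := Finset.mem_Ico.mp ha
    exact Finset.mem_Ico.mpr (by omega)
  · intro j hj hnj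
    have h1 := Finset.mem_Ico.mp hj
    have hjx : x < j + 1 := by
      by_contra hc
      exact hnj (Finset.mem_Ico.mpr (by omega))
    have hj1 : (0 : Int) < j + 1 := by omega
    rw [if_neg]
    intro hpos
    have hdiv : 1 ≤ PySem.Int.floordiv x (j + 1) := by
      have := lt_min_iff.mp hpos
      omega
    rw [PySem.Int.floordiv_eq_ediv_of_pos hj1] at hdiv
    have := (Int.le_ediv_iff_mul_le hj1).mp hdiv
    omega

-- ===== VERDICT (by name: the statement is the Claim_ definition above) =====
theorem CountSpecialsPairs_BF_spec : Claim_equal_CountSpecialsPairs_BF := by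
  intro x y _
  unfold Spec_CountSpecialsPairs_BF
  rw [pvASum, pvAltSum]
  rw [pvExtend x y]
  have hsplit : ∀ g : Int → Int, g 1 = 0 →
      ∑ j ∈ Finset.Ico (1 : Int) (y + 1), g j = ∑ j ∈ Finset.Ico (2 : Int) (y + 1), g j := by
    intro g hg
    refine (Finset.sum_subset ?_ ?_).symm
    · intro a ha
      have := Finset.mem_Ico.mp ha
      exact Finset.mem_Ico.mpr (by omega)
    · intro a ha hna
      have h1 := Finset.mem_Ico.mp ha
      have : a = 1 := by
        by_contra hne
        exact hna (Finset.mem_Ico.mpr (by omega))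
      rw [this, hg]
  rw [hsplit _ (by simp)]
  refine Finset.sum_congr rfl fun j hj => ?_
  have hj1 : 0 < j := by
    have := Finset.mem_Ico.mp hj; omega
  exact pvCore x j hj1
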